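-- pv_equiv track=rewrite | github.com/dofaromg/flow-tasks | particle_core/src/rebuild_fn.py | compress_fn
-- ===== SOURCE A (Python) =====
-- from typing import List, Dict, Any, Optional
--
-- def compress_fn(function_steps: List[str]) -> str:
--     """壓縮函數步驟為 .flpkg 格式"""
--     standard_steps = ["structure", "mark", "flow", "recurse", "store"]
--
--     if function_steps == standard_steps:
--         return "SEED(X) = STORE(RECURSE(FLOW(MARK(STRUCTURE(X)))))"
--
--     # 建構動態壓縮
--     if len(function_steps) > 0:
--         nested = function_steps[0].upper() + "(X)"
--         for step in function_steps[1:]: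
--             nested = f"{step.upper()}({nested})"
--         return f"CUSTOM_SEED(X) = {nested}"
--
--     return "EMPTY_LOGIC"
-- ===== SOURCE B (Python) =====
-- def compress_fn(function_steps):
--     standard_steps = ["structure", "mark", "flow", "recurse", "store"]
--     if function_steps == standard_steps:
--         return "SEED(X) = STORE(RECURSE(FLOW(MARK(STRUCTURE(X)))))"
--     if not function_steps:
--         return "EMPTY_LOGIC"
--     return ("CUSTOM_SEED(X) = "
--             + "(".join(s.upper() for s in reversed(function_steps))
--             + "(X" + ")" * len(function_steps))
-- ===== Notes on version B (the rewrite author's own statement) =====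
-- stated objective: simpler
-- what changed: Replaces the accumulator-wrapping loop over the tail by a one-shot construction: join the uppercased names in reverse order with '(', append '(X' and a computed count of closing parens.
import Mathlib
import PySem

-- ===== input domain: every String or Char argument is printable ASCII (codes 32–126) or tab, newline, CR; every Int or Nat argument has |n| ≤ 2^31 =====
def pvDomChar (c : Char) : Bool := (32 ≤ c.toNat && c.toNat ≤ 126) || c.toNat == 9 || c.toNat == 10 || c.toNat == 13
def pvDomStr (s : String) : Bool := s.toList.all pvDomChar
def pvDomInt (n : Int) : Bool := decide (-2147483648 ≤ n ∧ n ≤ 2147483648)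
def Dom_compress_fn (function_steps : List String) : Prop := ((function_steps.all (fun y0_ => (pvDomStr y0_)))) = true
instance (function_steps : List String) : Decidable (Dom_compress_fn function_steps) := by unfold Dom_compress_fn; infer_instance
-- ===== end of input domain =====

-- B replaces A's accumulator-wrapping loop by a one-shot join of the reversed
-- uppercased names plus a computed count of closing parens (objective: simpler).

-- ===== PORT A =====
def compress_fn (function_steps : List String) : String :=
  if function_steps = ["structure", "mark", "flow", "recurse", "store"] then
    "SEED(X) = STORE(RECURSE(FLOW(MARK(STRUCTURE(X)))))"
  else
    match function_steps with
    | [] => "EMPTY_LOGIC"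
    | h :: t =>
      -- nested = function_steps[0].upper() + "(X)"; for step in function_steps[1:]: nested = step.upper() + "(" + nested + ")"
      let nested := t.foldl (fun nested step => PySem.Str.upper step ++ "(" ++ nested ++ ")")
                      (PySem.Str.upper h ++ "(X)")
      "CUSTOM_SEED(X) = " ++ nested

-- ===== PORT B =====
def compress_fn_alt (function_steps : List String) : String :=
  if function_steps = ["structure", "mark", "flow", "recurse", "store"] then
    "SEED(X) = STORE(RECURSE(FLOW(MARK(STRUCTURE(X)))))"
  else if function_steps = [] then
    "EMPTY_LOGIC"
  else
    "CUSTOM_SEED(X) = "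
      ++ PySem.Str.join "(" ((function_steps.map PySem.Str.upper).reverse)
      ++ "(X"
      ++ String.ofList (List.replicate function_steps.length ')')   -- ")" * len(function_steps)

-- ===== PRECONDITION & SPEC =====
def Spec_compress_fn (function_steps : List String) (out : String) : Prop := out = compress_fn_alt function_steps
instance (function_steps : List String) (out : String) : Decidable (Spec_compress_fn function_steps out) := by unfold Spec_compress_fn; infer_instance

-- ===== CLAIM (what is proved, stated in full; the proofs are below) =====
def Claim_equal_compress_fn : Prop := ∀ (function_steps : List String), Dom_compress_fn function_steps → Spec_compress_fn function_steps (compress_fn function_steps)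

-- ===== LEMMAS AND PROOFS =====

-- A's wrapping loop, at the character level: prefixes in reverse order, then the
-- seed, then one ')' per wrapped step.
theorem fold_wrap_toList (t : List String) (a : String) :
    (t.foldl (fun nested step => PySem.Str.upper step ++ "(" ++ nested ++ ")") a).toList
      = t.reverse.flatMap (fun s => (PySem.Str.upper s).toList ++ ['('])
        ++ a.toList ++ List.replicate t.length ')' := by
  induction t generalizing a with
  | nil => simp
  | cons s t ih =>
      simp only [List.foldl_cons, ih, List.reverse_cons, List.flatMap_append,
        List.flatMap_cons, List.flatMap_nil, List.length_cons, String.toList_append]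
      have : (")" : String).toList = [')'] := rfl
      have hp : ("(" : String).toList = ['('] := rfl
      simp [this, hp, List.replicate_succ, List.append_assoc]

-- "(" .join of a list ending in y, at the character level.
theorem join_paren_toList (xs : List (List Char)) (y : List Char) :
    PySem.Chars.join ['('] (xs ++ [y]) = xs.flatMap (fun s => s ++ ['(']) ++ y := by
  induction xs with
  | nil => simp [PySem.Chars.join_singleton]
  | cons x xs ih =>
      cases xs with
      | nil => simp [PySem.Chars.join_cons_cons, PySem.Chars.join_singleton]
      | cons x' xs' =>
          simp only [List.cons_append, PySem.Chars.join_cons_cons] at ih ⊢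
          simp [ih, List.append_assoc]

-- ===== VERDICT (by name: the statement is the Claim_ definition above) =====
theorem compress_fn_spec : Claim_equal_compress_fn := by
  intro fs _
  show compress_fn fs = compress_fn_alt fs
  unfold compress_fn compress_fn_alt
  split
  · rfl
  · cases fs with
    | nil => rfl
    | cons h t =>
        simp only [reduceCtorEq, if_false]
        apply String.ext
        simp only [String.toList_append, fold_wrap_toList, PySem.Str.toList_join,
          List.map_reverse, List.map_map]
        have hrev : ((t.map fun s => (PySem.Str.upper s).toList).reverse
            ++ [(PySem.Str.upper h).toList])
            = ((h :: t).map fun s => (PySem.Str.upper s).toList).reverse := by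
          simp
        have hj := join_paren_toList ((t.map fun s => (PySem.Str.upper s).toList).reverse)
          ((PySem.Str.upper h).toList)
        rw [hrev] at hj
        have hcomp : (String.toList ∘ PySem.Str.upper) = fun s => (PySem.Str.upper s).toList := rfl
        have hsep : ("(" : String).toList = ['('] := rfl
        rw [hcomp, hsep, hj]
        have h1 : ("(X)" : String).toList = ['(', 'X', ')'] := rfl
        have h2 : ("(X" : String).toList = ['(', 'X'] := rfl
        have h3 : (String.ofList (List.replicate (h :: t).length ')')).toList
            = List.replicate (t.length + 1) ')' := by simp
        simp only [h1, h2, h3, PySem.Str.toList_upper, List.flatMap_reverse]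
        simp [List.replicate_succ, List.append_assoc, List.flatMap_map, Function.comp, List.reverse_append]
        have hfun : (List.reverse ∘ fun s : String => PySem.Chars.upper s.toList ++ ['(']) = (fun a : String => '(' :: (PySem.Chars.upper a.toList).reverse) := by
          funext a; simp
        rw [hfun]
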